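-- pv_equiv track=rewrite | github.com/TCPeralta/mutual-knn-clustering | src/mknn.py | acordoMutuo
-- ===== SOURCE A (Python) =====
-- def criaMatrVazia(n):
--     i=0
--     matrix = []
--     while(i<n):
--         j = 0
--         linha = []
--         while(j<n):
--             linha.append(0)
--             j+=1
--         i+=1
--         matrix.append(linha)
--     return matrix
--
-- def acordoMutuo(favoritos):
--     n = len(favoritos)
--     matrix = criaMatrVazia(n)
--     for i in range(n):
--         for j in range(n):
--             if ((i in favoritos[j]) and (j in favoritos[i])):
--                 matrix[i][j] = 1
--     return matrix
-- ===== SOURCE B (Python) =====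
-- def acordoMutuo(favoritos):
--     n = len(favoritos)
--     matrix = [[0] * n for _ in range(n)]
--     for i in range(n):
--         for j in favoritos[i]:
--             if 0 <= j < n and i in favoritos[j]:
--                 matrix[i][j] = 1
--     return matrix
-- ===== Notes on version B (the rewrite author's own statement) =====
-- stated objective: faster
-- what changed: Replaces A's double scan over all n*n index pairs (each doing list membership tests) by one pass that, for each row i, visits only the candidate neighbours j listed in favoritos[i] (with a bounds check) and checks mutuality, so cells not named in any favourite list are never examined.
import Mathlib
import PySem

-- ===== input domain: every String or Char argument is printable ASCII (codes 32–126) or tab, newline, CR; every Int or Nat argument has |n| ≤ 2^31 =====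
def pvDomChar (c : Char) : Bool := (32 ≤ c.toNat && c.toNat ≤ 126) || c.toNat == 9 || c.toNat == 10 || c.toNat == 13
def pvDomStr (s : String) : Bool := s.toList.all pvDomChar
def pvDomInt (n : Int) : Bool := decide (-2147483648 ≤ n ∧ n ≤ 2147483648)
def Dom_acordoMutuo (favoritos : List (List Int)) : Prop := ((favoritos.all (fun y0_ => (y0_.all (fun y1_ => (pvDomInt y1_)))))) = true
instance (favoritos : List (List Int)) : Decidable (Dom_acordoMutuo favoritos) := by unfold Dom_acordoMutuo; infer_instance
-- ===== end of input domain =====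

-- B replaces A's all-pairs double scan over range(n)×range(n) by a pass over each row's own
-- candidate list favoritos[i] (with a bounds check), touching only listed neighbours: faster
-- when the favourite lists are short relative to n.

-- ===== PORT A =====
-- while-loop of criaMatrVazia building one row of zeros (j counts up to n)
def pvLinhaLoop (n j : Int) (linha : List Int) : List Int :=
  if j < n then pvLinhaLoop n (j + 1) (linha ++ [0]) else linha
termination_by (n - j).toNat
decreasing_by omega

-- outer while-loop of criaMatrVazia (i counts up to n)
def pvMatrLoop (n i : Int) (matrix : List (List Int)) : List (List Int) :=
  if i < n then pvMatrLoop n (i + 1) (matrix ++ [pvLinhaLoop n 0 []]) else matrix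
termination_by (n - i).toNat
decreasing_by omega

def criaMatrVazia (n : Int) : List (List Int) := pvMatrLoop n 0 []

-- favoritos[i] / favoritos[j] are always indexed with 0 ≤ i,j < len(favoritos), so the
-- pyGetD default [] is never used; matrix[i][j] = 1 is List.modify/List.set at in-range indices.
def acordoMutuo (favoritos : List (List Int)) : List (List Int) :=
  let n : Int := favoritos.length
  (PySem.List.pyRange 0 n 1).foldl (fun m i =>
    (PySem.List.pyRange 0 n 1).foldl (fun m j =>
      if (PySem.List.pyGetD favoritos j []).contains i && (PySem.List.pyGetD favoritos i []).contains j
      then m.modify i.toNat (fun r => r.set j.toNat 1) else m) m)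
    (criaMatrVazia n)

-- ===== PORT B =====
def acordoMutuo_alt (favoritos : List (List Int)) : List (List Int) :=
  let n : Int := favoritos.length
  (PySem.List.pyRange 0 n 1).foldl (fun m i =>
    (PySem.List.pyGetD favoritos i []).foldl (fun m j =>
      if (decide (0 ≤ j) && decide (j < n)) && (PySem.List.pyGetD favoritos j []).contains i
      then m.modify i.toNat (fun r => r.set j.toNat 1) else m) m)
    (List.replicate n.toNat (List.replicate n.toNat (0 : Int)))

-- ===== PRECONDITION & SPEC =====
def Spec_acordoMutuo (favoritos : List (List Int)) (out : List (List Int)) : Prop := out = acordoMutuo_alt favoritos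
instance (favoritos : List (List Int)) (out : List (List Int)) : Decidable (Spec_acordoMutuo favoritos out) := by unfold Spec_acordoMutuo; infer_instance

-- ===== CLAIM (what is proved, stated in full; the proofs are below) =====
def Claim_equal_acordoMutuo : Prop := ∀ (favoritos : List (List Int)), Dom_acordoMutuo favoritos → Spec_acordoMutuo favoritos (acordoMutuo favoritos)

-- ===== LEMMAS AND PROOFS =====

lemma pvLinhaLoop_eq (n : Int) : ∀ (k : Nat) (j : Int) (acc : List Int), (n - j).toNat = k →
    pvLinhaLoop n j acc = acc ++ List.replicate k 0 := by
  intro k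
  induction k with
  | zero =>
    intro j acc h
    rw [pvLinhaLoop]
    have : ¬ j < n := by omega
    simp [this]
  | succ k ih =>
    intro j acc h
    rw [pvLinhaLoop]
    have hj : j < n := by omega
    rw [if_pos hj, ih (j + 1) _ (by omega)]
    simp [List.replicate_succ]

lemma pvMatrLoop_eq (n : Int) : ∀ (k : Nat) (i : Int) (acc : List (List Int)), (n - i).toNat = k →
    pvMatrLoop n i acc = acc ++ List.replicate k (pvLinhaLoop n 0 []) := by
  intro k
  induction k with
  | zero =>
    intro i acc h
    rw [pvMatrLoop]
    have : ¬ i < n := by omega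
    simp [this]
  | succ k ih =>
    intro i acc h
    rw [pvMatrLoop]
    have hi : i < n := by omega
    rw [if_pos hi, ih (i + 1) _ (by omega)]
    simp [List.replicate_succ]

lemma criaMatrVazia_eq (n : Int) :
    criaMatrVazia n = List.replicate n.toNat (List.replicate n.toNat (0 : Int)) := by
  unfold criaMatrVazia
  rw [pvMatrLoop_eq n n.toNat 0 [] (by omega), pvLinhaLoop_eq n n.toNat 0 [] (by omega)]
  simp

-- entrywise characterisation of a "set some positions to 1" fold
lemma rowFold_getElem? (c : Int → Bool) : ∀ (js : List Int) (r : List Int) (k : Nat),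
    (js.foldl (fun r j => if c j then r.set j.toNat 1 else r) r)[k]? =
      if (js.any fun j => c j && j.toNat == k) && decide (k < r.length) then some 1 else r[k]? := by
  intro js
  induction js with
  | nil => intro r k; simp
  | cons j js ih =>
    intro r k
    simp only [List.foldl_cons, List.any_cons]
    by_cases hc : c j = true
    · rw [if_pos hc, ih, List.length_set, List.getElem?_set]
      simp only [hc, Bool.true_and]
      by_cases hjk : j.toNat = k <;> by_cases hk : k < r.length <;>
        by_cases ha : (js.any fun j => c j && j.toNat == k) = true <;>
          simp_all
    · have hf : c j = false := Bool.eq_false_iff.mpr hc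
      rw [if_neg hc, ih]
      simp [hf]

-- pulling the row-modify out of a conditional fold over one row index
lemma foldl_modify_pull (i : Nat) (c : Int → Bool) :
    ∀ (js : List Int) (m : List (List Int)),
      js.foldl (fun m j => if c j then m.modify i (fun r => r.set j.toNat 1) else m) m
        = m.modify i (fun r => js.foldl (fun r j => if c j then r.set j.toNat 1 else r) r) := by
  intro js
  induction js with
  | nil =>
    intro m
    simp only [List.foldl_nil]
    exact (List.modify_id i m).symm
  | cons j js ih =>
    intro m
    simp only [List.foldl_cons]
    by_cases hc : c j = true
    · simp only [if_pos hc]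
      rw [ih, List.modify_modify_eq]
      rfl
    · simp only [if_neg hc]
      exact ih m

-- the set of positions set to 1 in row i is the same for A's scan and B's neighbour pass
lemma cond_eq (favoritos : List (List Int)) (i : Int) (k : Nat) :
    ((PySem.List.pyRange 0 (favoritos.length : Int) 1).any fun j =>
        ((PySem.List.pyGetD favoritos j []).contains i && (PySem.List.pyGetD favoritos i []).contains j) && j.toNat == k)
    = ((PySem.List.pyGetD favoritos i []).any fun j =>
        ((decide (0 ≤ j) && decide (j < (favoritos.length : Int))) && (PySem.List.pyGetD favoritos j []).contains i) && j.toNat == k) := by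
  rw [Bool.eq_iff_iff]
  simp only [List.any_eq_true, Bool.and_eq_true, decide_eq_true_eq, beq_iff_eq,
    List.contains_iff_mem, PySem.List.mem_pyRange_one]
  constructor
  · rintro ⟨j, ⟨h0, hn⟩, ⟨hij, hji⟩, hk⟩
    exact ⟨j, hji, ⟨⟨h0, hn⟩, hij⟩, hk⟩
  · rintro ⟨j, hji, ⟨⟨h0, hn⟩, hij⟩, hk⟩
    exact ⟨j, ⟨h0, hn⟩, ⟨hij, hji⟩, hk⟩

-- the two inner loops perform the same transformation of the matrix, for every outer index i
lemma step_eq (favoritos : List (List Int)) (i : Int) (m : List (List Int)) :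
    ((PySem.List.pyRange 0 (favoritos.length : Int) 1).foldl (fun m j =>
        if (PySem.List.pyGetD favoritos j []).contains i && (PySem.List.pyGetD favoritos i []).contains j
        then m.modify i.toNat (fun r => r.set j.toNat 1) else m) m)
    = ((PySem.List.pyGetD favoritos i []).foldl (fun m j =>
        if (decide (0 ≤ j) && decide (j < (favoritos.length : Int))) && (PySem.List.pyGetD favoritos j []).contains i
        then m.modify i.toNat (fun r => r.set j.toNat 1) else m) m) := by
  rw [foldl_modify_pull i.toNat (fun j => (PySem.List.pyGetD favoritos j []).contains i && (PySem.List.pyGetD favoritos i []).contains j),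
      foldl_modify_pull i.toNat (fun j => (decide (0 ≤ j) && decide (j < (favoritos.length : Int))) && (PySem.List.pyGetD favoritos j []).contains i)]
  congr 1
  funext r
  apply List.ext_getElem?_iff.mpr
  intro k
  rw [rowFold_getElem?, rowFold_getElem?, cond_eq]

-- ===== VERDICT (by name: the statement is the Claim_ definition above) =====
theorem acordoMutuo_spec : Claim_equal_acordoMutuo := by
  intro favoritos _
  unfold Spec_acordoMutuo acordoMutuo acordoMutuo_alt
  simp only [criaMatrVazia_eq]
  exact PySem.List.foldl_congr_mem _ _ _ _ (fun m i _ => step_eq favoritos i m)
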